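-- pv_equiv track=rewrite | github.com/Henkkk/codewars_python_solutions | snail.py | layer_length
-- ===== SOURCE A (Python) =====
-- def layer_length(array):
--     dimension = len(array)
--     li = []
--     if dimension % 2 != 0:
--         n_i = int(dimension/2)
--         v = (dimension ** 2) - 1
--         for i in range(n_i):
--             v -= 8 * i
--             li.append(v)
--     else:
--         n_i = int((dimension-2)/2)
--         a,b = dimension, dimension - 2
--         v = 0
--         for i in range(n_i):
--             v += (a - 2 * i) * 2 + (b - 2 * i) * 2
--             li.append(v)
--     return li
-- ===== SOURCE B (Python) =====
-- def layer_length(array):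
--     d = len(array)
--     if d % 2 != 0:
--         return [d * d - 1 - 4 * i * (i + 1) for i in range(d // 2)]
--     return [(k + 1) * (4 * d - 4 - 4 * k) for k in range((d - 2) // 2)]
-- ===== Notes on version B (the rewrite author's own statement) =====
-- stated objective: simpler
-- what changed: Replaces the running accumulator loop with a direct closed-form expression per index (each element computed independently in a comprehension), removing the sequential dependency and the mutable list/value state.
import Mathlib
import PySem

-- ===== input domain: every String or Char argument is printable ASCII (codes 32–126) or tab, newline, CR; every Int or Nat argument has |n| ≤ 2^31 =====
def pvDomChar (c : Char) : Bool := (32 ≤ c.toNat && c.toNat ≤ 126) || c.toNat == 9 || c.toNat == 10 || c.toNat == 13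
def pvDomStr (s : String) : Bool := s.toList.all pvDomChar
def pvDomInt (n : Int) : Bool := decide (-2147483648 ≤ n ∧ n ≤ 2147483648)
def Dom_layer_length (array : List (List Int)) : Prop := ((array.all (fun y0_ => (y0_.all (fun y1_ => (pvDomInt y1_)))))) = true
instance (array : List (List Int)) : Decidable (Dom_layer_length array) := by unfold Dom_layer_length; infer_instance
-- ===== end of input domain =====

-- B replaces A's running accumulator with an independent closed-form value per index (objective: simpler).

-- ===== PORT A =====
def layer_length (array : List (List Int)) : List Int :=
  let dimension : Int := array.length
  if dimension % 2 ≠ 0 then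
    let n_i : Int := PySem.Int.floordiv dimension 2
    let res := (PySem.List.pyRange 0 n_i 1).foldl
      (fun (st : Int × List Int) i =>
        let v := st.1 - 8 * i
        (v, st.2 ++ [v]))
      (dimension ^ 2 - 1, [])
    res.2
  else
    let n_i : Int := PySem.Int.floordiv (dimension - 2) 2
    let a : Int := dimension
    let b : Int := dimension - 2
    let res := (PySem.List.pyRange 0 n_i 1).foldl
      (fun (st : Int × List Int) i =>
        let v := st.1 + ((a - 2 * i) * 2 + (b - 2 * i) * 2)
        (v, st.2 ++ [v]))
      (0, [])
    res.2

-- ===== PORT B =====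
def layer_length_alt (array : List (List Int)) : List Int :=
  let d : Int := array.length
  if d % 2 ≠ 0 then
    (PySem.List.pyRange 0 (PySem.Int.floordiv d 2) 1).map
      (fun i => d * d - 1 - 4 * i * (i + 1))
  else
    (PySem.List.pyRange 0 (PySem.Int.floordiv (d - 2) 2) 1).map
      (fun k => (k + 1) * (4 * d - 4 - 4 * k))

-- ===== PRECONDITION & SPEC =====
def Spec_layer_length (array : List (List Int)) (out : List Int) : Prop := out = layer_length_alt array
instance (array : List (List Int)) (out : List Int) : Decidable (Spec_layer_length array out) := by unfold Spec_layer_length; infer_instance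

-- ===== CLAIM (what is proved, stated in full; the proofs are below) =====
def Claim_equal_layer_length : Prop := ∀ (array : List (List Int)), Dom_layer_length array → Spec_layer_length array (layer_length array)

-- ===== LEMMAS AND PROOFS =====

-- A's odd-branch loop: state after m iterations, in closed form.
theorem odd_loop (v0 : Int) (m : Nat) :
    (PySem.List.pyRange 0 m 1).foldl
      (fun (st : Int × List Int) i =>
        let v := st.1 - 8 * i
        (v, st.2 ++ [v]))
      (v0, [])
    = (v0 - 4 * ((m : Int) - 1) * m,
       (PySem.List.pyRange 0 m 1).map (fun i => v0 - 4 * i * (i + 1))) := by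
  induction m with
  | zero => simp [PySem.List.pyRange]
  | succ m ih =>
    rw [show ((m + 1 : Nat) : Int) = (m : Int) + 1 by push_cast; ring] at *
    rw [PySem.List.pyRange_one_succ_right (by positivity)]
    simp only [List.foldl_append, List.map_append, ih, List.foldl_cons, List.foldl_nil,
      List.map_cons, List.map_nil]
    refine Prod.ext ?_ ?_
    · ring
    · simp only []; congr 1; congr 1; ring

-- A's even-branch loop: state after m iterations, in closed form.
theorem even_loop (d : Int) (m : Nat) :
    (PySem.List.pyRange 0 m 1).foldl
      (fun (st : Int × List Int) i =>
        let v := st.1 + ((d - 2 * i) * 2 + ((d - 2) - 2 * i) * 2)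
        (v, st.2 ++ [v]))
      (0, [])
    = ((m : Int) * (4 * d - 4 * m),
       (PySem.List.pyRange 0 m 1).map (fun k => (k + 1) * (4 * d - 4 - 4 * k))) := by
  induction m with
  | zero => simp [PySem.List.pyRange]
  | succ m ih =>
    rw [show ((m + 1 : Nat) : Int) = (m : Int) + 1 by push_cast; ring] at *
    rw [PySem.List.pyRange_one_succ_right (by positivity)]
    simp only [List.foldl_append, List.map_append, ih, List.foldl_cons, List.foldl_nil,
      List.map_cons, List.map_nil]
    refine Prod.ext ?_ ?_
    · ring
    · simp only []; congr 1; congr 1; ring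

-- ===== VERDICT (by name: the statement is the Claim_ definition above) =====
theorem layer_length_spec : Claim_equal_layer_length := by
  intro array _
  simp only [Spec_layer_length, layer_length, layer_length_alt]
  by_cases h : (array.length : Int) % 2 ≠ 0
  · have h2 : PySem.Int.floordiv (array.length : Int) 2
        = ((((array.length : Int)) / 2).toNat : Int) := by
      rw [PySem.Int.floordiv_eq_ediv_of_pos (by norm_num)]
      omega
    rw [if_pos h, if_pos h, h2, odd_loop]
    exact List.map_congr_left (fun i hi => by ring)
  · rcases Nat.eq_zero_or_pos array.length with h0 | h0
    · rw [if_neg h, if_neg h]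
      simp [h0, PySem.Int.floordiv, PySem.List.pyRange]
    · have hge : (2 : Int) ≤ (array.length : Int) := by omega
      have h2 : PySem.Int.floordiv ((array.length : Int) - 2) 2
          = ((((array.length : Int) - 2) / 2).toNat : Int) := by
        rw [PySem.Int.floordiv_eq_ediv_of_pos (by norm_num)]
        omega
      rw [if_neg h, if_neg h, h2, even_loop]
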